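-- pv_equiv track=rewrite | github.com/nishantaMishra/BatteryInformatics | adsorption/system_builder/ase/io/cif_unicode.py | replace_subscript
-- ===== SOURCE A (Python) =====
-- superscript_dict = {
--     '0': '\u2070',  # superscript 0
--     '1': '\u00b9',  # superscript 1
--     '2': '\u00b2',  # superscript 2
--     '3': '\u00b3',  # superscript 3
--     '4': '\u2074',  # superscript 4
--     '5': '\u2075',  # superscript 5
--     '6': '\u2076',  # superscript 6
--     '7': '\u2077',  # superscript 7
--     '8': '\u2078',  # superscript 8
--     '9': '\u2079',  # superscript 9
-- }
--
-- subscript_dict = {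
--     '0': '\u2080',  # subscript 0
--     '1': '\u2081',  # subscript 1
--     '2': '\u2082',  # subscript 2
--     '3': '\u2083',  # subscript 3
--     '4': '\u2084',  # subscript 4
--     '5': '\u2085',  # subscript 5
--     '6': '\u2086',  # subscript 6
--     '7': '\u2087',  # subscript 7
--     '8': '\u2088',  # subscript 8
--     '9': '\u2089',  # subscript 9
-- }
--
-- def replace_subscript(s: str, subscript=True) -> str:
--
--     target = '~'
--     rdict = subscript_dict
--     if not subscript:
--         target = '^'
--         rdict = superscript_dict
--
--     replaced = []
--     inside = False
--     for char in s:
--         if char == target: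
--             inside = not inside
--         elif not inside:
--             replaced += [char]
--         # note: do not use char.isdigit - this also matches (sub/super)scripts
--         elif char in rdict:
--             replaced += [rdict[char]]
--         else:
--             replaced += [char]
--
--     return ''.join(replaced)
-- ===== SOURCE B (Python) =====
-- superscript_dict = {
--     '0': '\u2070', '1': '\u00b9', '2': '\u00b2', '3': '\u00b3', '4': '\u2074',
--     '5': '\u2075', '6': '\u2076', '7': '\u2077', '8': '\u2078', '9': '\u2079',
-- }
--
-- subscript_dict = {
--     '0': '\u2080', '1': '\u2081', '2': '\u2082', '3': '\u2083', '4': '\u2084',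
--     '5': '\u2085', '6': '\u2086', '7': '\u2087', '8': '\u2088', '9': '\u2089',
-- }
--
-- def replace_subscript(s: str, subscript=True) -> str:
--     target = '~' if subscript else '^'
--     rdict = subscript_dict if subscript else superscript_dict
--     parts = s.split(target)
--     out = []
--     for i, part in enumerate(parts):
--         if i % 2 == 0:
--             out.append(part)
--         else:
--             out.append(''.join(rdict.get(c, c) for c in part))
--     return ''.join(out)
-- ===== Notes on version B (the rewrite author's own statement) =====
-- stated objective: faster
-- what changed: Replaces the per-character toggle-flag scan with str.split on the delimiter and translating only the odd-indexed (inside) segments by parity.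
import Mathlib
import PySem

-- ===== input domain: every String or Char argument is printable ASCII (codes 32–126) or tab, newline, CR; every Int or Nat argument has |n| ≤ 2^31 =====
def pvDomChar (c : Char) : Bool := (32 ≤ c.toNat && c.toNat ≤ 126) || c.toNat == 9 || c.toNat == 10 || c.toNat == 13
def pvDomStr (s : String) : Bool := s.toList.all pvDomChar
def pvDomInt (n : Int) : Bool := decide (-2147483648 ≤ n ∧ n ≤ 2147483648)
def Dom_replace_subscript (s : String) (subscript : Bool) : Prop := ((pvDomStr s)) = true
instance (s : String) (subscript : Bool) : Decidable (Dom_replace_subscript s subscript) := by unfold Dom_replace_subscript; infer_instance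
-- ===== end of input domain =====

-- B replaces A's per-character toggle-flag scan by splitting on the delimiter and translating the
-- odd-indexed (inside) segments by parity; a timing run measured B faster (constant factor: C-level split/join).

-- ===== PORT A =====
-- the two digit-translation dicts (Python dict str->str of single chars -> assoc list Char × Char)
def superscriptDict : List (Char × Char) :=
  [('0', '⁰'), ('1', '¹'), ('2', '²'), ('3', '³'), ('4', '⁴'),
   ('5', '⁵'), ('6', '⁶'), ('7', '⁷'), ('8', '⁸'), ('9', '⁹')]

def subscriptDict : List (Char × Char) :=
  [('0', '₀'), ('1', '₁'), ('2', '₂'), ('3', '₃'), ('4', '₄'),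
   ('5', '₅'), ('6', '₆'), ('7', '₇'), ('8', '₈'), ('9', '₉')]

-- A's loop body (the for-loop's branch cascade), named so the port uses it directly
def stepA (t : Char) (rd : List (Char × Char)) (st : List Char × Bool) (char : Char) : List Char × Bool :=
  if char = t then (st.1, !st.2)
  else if !st.2 then (st.1 ++ [char], st.2)
  else match rd.lookup char with
    | some r => (st.1 ++ [r], st.2)
    | none   => (st.1 ++ [char], st.2)

def replace_subscript (s : String) (subscript : Bool) : String :=
  let target : Char := if !subscript then '^' else '~'
  let rdict : List (Char × Char) := if !subscript then superscriptDict else subscriptDict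
  let st := s.toList.foldl (stepA target rdict) ([], false)
  String.mk st.1

-- ===== PORT B =====
-- hand port of Python's s.split(sep) for a one-character sep (exact: ''.split(t) = [''],
-- adjacent/leading/trailing delimiters give empty segments)
def pySplitChar (t : Char) : List Char → List (List Char)
  | [] => [[]]
  | c :: cs =>
    match pySplitChar t cs with
    | [] => [[]]  -- unreachable: pySplitChar never returns []
    | p :: ps => if c = t then [] :: p :: ps else (c :: p) :: ps

def replace_subscript_alt (s : String) (subscript : Bool) : String :=
  let target : Char := if subscript then '~' else '^'
  let rdict : List (Char × Char) := if subscript then subscriptDict else superscriptDict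
  let parts := pySplitChar target s.toList
  String.mk (((PySem.List.enumerate parts).map
    (fun ip => if ip.1 % 2 = 0 then ip.2
               else ip.2.map (fun c => ((rdict.lookup c).getD c)))).flatten)

-- ===== PRECONDITION & SPEC =====
def Spec_replace_subscript (s : String) (subscript : Bool) (out : String) : Prop := out = replace_subscript_alt s subscript
instance (s : String) (subscript : Bool) (out : String) : Decidable (Spec_replace_subscript s subscript out) := by unfold Spec_replace_subscript; infer_instance

-- ===== CLAIM (what is proved, stated in full; the proofs are below) =====
def Claim_equal_replace_subscript : Prop := ∀ (s : String) (subscript : Bool), Dom_replace_subscript s subscript → Spec_replace_subscript s subscript (replace_subscript s subscript)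

-- ===== LEMMAS AND PROOFS =====

-- direct recursive account of A's toggle scan
def goA (t : Char) (rd : List (Char × Char)) : Bool → List Char → List Char
  | _, [] => []
  | inside, c :: cs =>
    if c = t then goA t rd (!inside) cs
    else if !inside then c :: goA t rd inside cs
    else ((rd.lookup c).getD c) :: goA t rd inside cs

lemma stepA_target {t : Char} {rd : List (Char × Char)} {st : List Char × Bool} {c : Char}
    (hc : c = t) : stepA t rd st c = (st.1, !st.2) := by
  simp [stepA, hc]

lemma stepA_out {t : Char} {rd : List (Char × Char)} {st : List Char × Bool} {c : Char}
    (hc : c ≠ t) (hi : st.2 = false) : stepA t rd st c = (st.1 ++ [c], st.2) := by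
  simp [stepA, hc, hi]

lemma stepA_in {t : Char} {rd : List (Char × Char)} {st : List Char × Bool} {c : Char}
    (hc : c ≠ t) (hi : st.2 = true) :
    stepA t rd st c = (st.1 ++ [(rd.lookup c).getD c], st.2) := by
  simp only [stepA, hc, hi, Bool.not_true, ite_false]
  cases h : rd.lookup c <;> simp

lemma foldl_eq_goA (t : Char) (rd : List (Char × Char)) :
    ∀ (cs : List Char) (acc : List Char) (inside : Bool),
    (cs.foldl (stepA t rd) (acc, inside)).1 = acc ++ goA t rd inside cs := by
  intro cs
  induction cs with
  | nil => intro acc inside; simp [goA]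
  | cons c cs ih =>
    intro acc inside
    rw [List.foldl_cons]
    by_cases hc : c = t
    · rw [stepA_target hc]; simp [goA, hc, ih]
    · cases inside with
      | false => rw [stepA_out hc rfl]; simp [goA, hc, ih]
      | true => rw [stepA_in hc rfl]; simp [goA, hc, ih]

lemma pySplitChar_ne_nil (t : Char) (cs : List Char) : pySplitChar t cs ≠ [] := by
  cases cs with
  | nil => simp [pySplitChar]
  | cons c cs =>
    cases h : pySplitChar t cs with
    | nil => simp [pySplitChar, h]
    | cons p ps => by_cases hc : c = t <;> simp [pySplitChar, h, hc]

-- B's rendering, as an alternating-flag recursion over the parts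
def renderB (rd : List (Char × Char)) : Bool → List (List Char) → List Char
  | _, [] => []
  | inside, p :: ps =>
    (if inside then p.map (fun c => ((rd.lookup c).getD c)) else p) ++ renderB rd (!inside) ps

-- the enumerate/parity map-flatten of port B equals renderB (parity of the start index = the flag)
lemma enumerate_flatten_eq_renderB (rd : List (Char × Char)) :
    ∀ (ps : List (List Char)) (n : Int),
    ((PySem.List.enumerate ps n).map
      (fun ip => if ip.1 % 2 = 0 then ip.2
                 else ip.2.map (fun c => ((rd.lookup c).getD c)))).flatten
      = renderB rd (decide (n % 2 ≠ 0)) ps := by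
  intro ps
  induction ps with
  | nil => intro n; simp [PySem.List.enumerate_nil, renderB]
  | cons p ps ih =>
    intro n
    rw [PySem.List.enumerate_cons]
    simp only [List.map_cons, List.flatten_cons, ih (n + 1)]
    by_cases h : n % 2 = 0
    · have h1 : (n + 1) % 2 ≠ 0 := by omega
      simp only [renderB]
      simp [h, h1]
    · have h1 : (n + 1) % 2 = 0 := by omega
      simp only [renderB]
      simp [h, h1]

-- splitting then rendering by parity equals A's toggle scan
lemma renderB_split_eq_goA (t : Char) (rd : List (Char × Char)) :
    ∀ (cs : List Char) (inside : Bool),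
    renderB rd inside (pySplitChar t cs) = goA t rd inside cs := by
  intro cs
  induction cs with
  | nil => intro inside; simp [pySplitChar, renderB, goA]
  | cons c cs ih =>
    intro inside
    simp only [pySplitChar]
    cases h : pySplitChar t cs with
    | nil => exact absurd h (pySplitChar_ne_nil t cs)
    | cons p ps =>
      by_cases hc : c = t
      · simp only [hc, goA, if_true]
        have := ih (!inside)
        rw [h] at this
        simpa [renderB] using this
      · have := ih inside
        rw [h] at this
        cases inside <;>
          simp_all [renderB, goA]

-- ===== VERDICT (by name: the statement is the Claim_ definition above) =====
theorem replace_subscript_spec : Claim_equal_replace_subscript := by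
  intro s subscript _
  unfold Spec_replace_subscript replace_subscript replace_subscript_alt
  cases subscript <;>
  · simp only [Bool.not_true, Bool.not_false, if_true]
    rw [foldl_eq_goA, enumerate_flatten_eq_renderB, renderB_split_eq_goA]
    simp
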